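-- pv_equiv track=rewrite | github.com/austinleedavis/chess_mech_interp | src/prepare_lichess_dataset.py | batch_offset_mapping_to_move_index
-- ===== SOURCE A (Python) =====
-- def batch_offset_mapping_to_move_index(batch_offset_mapping):
--     batch_move_indices = []
--
--     for game_offsets in batch_offset_mapping:
--         move_indices = []
--         current_group = []
--         group_start = 0
--         for i, (start, end) in enumerate(game_offsets):
--             # Add the current token to the group
--             current_group.append((start, end))
--
--             # Check if the current token is the last one or if the next token starts where the current one ends
--             if i == len(game_offsets) - 1 or game_offsets[i + 1][0] != end:
--                 # Group is complete, add to grouped_offsets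
--                 grouped_start = current_group[0][0]
--                 grouped_end = current_group[-1][1]
--                 move_indices.extend([group_start] * len(current_group))
--                 current_group = []
--                 group_start += 1
--
--         batch_move_indices.append(move_indices)
--
--     return batch_move_indices
-- ===== SOURCE B (Python) =====
-- def _game_move_indices(game_offsets):
--     move_indices = []
--     idx = -1
--     prev_end = None
--     for start, end in game_offsets:
--         if prev_end is None or start != prev_end:
--             idx += 1
--         move_indices.append(idx)
--         prev_end = end
--     return move_indices
--
--
-- def batch_offset_mapping_to_move_index(batch_offset_mapping):
--     return [_game_move_indices(g) for g in batch_offset_mapping]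
-- ===== Notes on version B (the rewrite author's own statement) =====
-- stated objective: simpler
-- what changed: Replaces A's group-buffer pass (accumulate tuples, forward-look at game_offsets[i+1], flush with a bulk extend-by-repetition) by a per-game running counter: idx is bumped on a backward-looking boundary test against the previous token's end and emitted once per token; no group list, no indexing, no replication.
import Mathlib
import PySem

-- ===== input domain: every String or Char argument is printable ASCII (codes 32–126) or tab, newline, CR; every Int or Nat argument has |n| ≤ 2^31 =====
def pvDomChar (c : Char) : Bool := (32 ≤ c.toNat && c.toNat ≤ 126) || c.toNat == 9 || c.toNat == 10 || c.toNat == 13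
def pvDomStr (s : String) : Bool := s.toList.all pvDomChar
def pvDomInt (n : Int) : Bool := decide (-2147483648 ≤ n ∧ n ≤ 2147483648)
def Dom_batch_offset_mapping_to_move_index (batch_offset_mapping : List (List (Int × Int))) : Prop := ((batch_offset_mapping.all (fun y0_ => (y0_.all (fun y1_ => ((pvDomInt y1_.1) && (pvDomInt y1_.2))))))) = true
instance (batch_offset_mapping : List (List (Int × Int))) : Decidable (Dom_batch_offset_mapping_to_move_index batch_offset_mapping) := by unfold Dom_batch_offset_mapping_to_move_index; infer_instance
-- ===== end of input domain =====

-- B replaces A's group-buffer pass (forward look at game_offsets[i+1], bulk extend) by a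
-- running move-index counter with a backward-looking boundary test; objective: simpler.

-- ===== PORT A =====
-- inner loop of A over one game: state = (move_indices, current_group, group_start)
def pvGameA (g : List (Int × Int)) : List Int :=
  ((PySem.List.enumerate g).foldl
    (fun (s : List Int × List (Int × Int) × Int) ie =>
      let i := ie.1
      let start := ie.2.1
      let e := ie.2.2
      -- current_group.append((start, end))
      let grp := s.2.1 ++ [(start, e)]
      if i = (g.length : Int) - 1 ∨ ((PySem.List.pyGet? g (i + 1)).getD (0, 0)).1 ≠ e then
        -- grouped_start / grouped_end are computed by A but never used
        let _grouped_start := ((PySem.List.pyGet? grp 0).getD (0, 0)).1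
        let _grouped_end := ((PySem.List.pyGet? grp (-1)).getD (0, 0)).2
        (s.1 ++ List.replicate grp.length s.2.2, [], s.2.2 + 1)
      else
        (s.1, grp, s.2.2))
    ([], [], 0)).1

def batch_offset_mapping_to_move_index (batch_offset_mapping : List (List (Int × Int))) : List (List Int) :=
  batch_offset_mapping.foldl (fun acc g => acc ++ [pvGameA g]) []

-- ===== PORT B =====
-- one game: state = (move_indices, idx, prev_end)
def pvGameB (g : List (Int × Int)) : List Int :=
  (g.foldl
    (fun (s : List Int × Int × Option Int) se =>
      let idx := if s.2.2 = none ∨ s.2.2 ≠ some se.1 then s.2.1 + 1 else s.2.1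
      (s.1 ++ [idx], idx, some se.2))
    ([], -1, none)).1

def batch_offset_mapping_to_move_index_alt (batch_offset_mapping : List (List (Int × Int))) : List (List Int) :=
  batch_offset_mapping.map pvGameB

-- ===== PRECONDITION & SPEC =====
def Spec_batch_offset_mapping_to_move_index (batch_offset_mapping : List (List (Int × Int))) (out : List (List Int)) : Prop := out = batch_offset_mapping_to_move_index_alt batch_offset_mapping
instance (batch_offset_mapping : List (List (Int × Int))) (out : List (List Int)) : Decidable (Spec_batch_offset_mapping_to_move_index batch_offset_mapping out) := by unfold Spec_batch_offset_mapping_to_move_index; infer_instance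

-- ===== CLAIM (what is proved, stated in full; the proofs are below) =====
def Claim_equal_batch_offset_mapping_to_move_index : Prop := ∀ (batch_offset_mapping : List (List (Int × Int))), Dom_batch_offset_mapping_to_move_index batch_offset_mapping → Spec_batch_offset_mapping_to_move_index batch_offset_mapping (batch_offset_mapping_to_move_index batch_offset_mapping)

-- ===== LEMMAS AND PROOFS =====

-- proof-side structural recursion equivalent to A's indexed fold over one game
def pvRunA : List (Int × Int) → List (Int × Int) → Int → List Int → List Int
  | [], _, _, acc => acc
  | (s, e) :: tl, grp, gs, acc =>
    if tl = [] ∨ (tl.headD (0, 0)).1 ≠ e then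
      pvRunA tl [] (gs + 1) (acc ++ List.replicate (grp ++ [(s, e)]).length gs)
    else
      pvRunA tl (grp ++ [(s, e)]) gs acc

-- A's fold over the enumerated suffix equals pvRunA on that suffix
theorem pvFoldA_eq (g : List (Int × Int)) :
    ∀ (rest : List (Int × Int)) (i : Nat) (acc : List Int) (grp : List (Int × Int)) (gs : Int),
      g.drop i = rest →
      ((PySem.List.enumerate rest (i : Int)).foldl
        (fun (s : List Int × List (Int × Int) × Int) ie =>
          let i := ie.1
          let start := ie.2.1
          let e := ie.2.2
          let grp := s.2.1 ++ [(start, e)]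
          if i = (g.length : Int) - 1 ∨ ((PySem.List.pyGet? g (i + 1)).getD (0, 0)).1 ≠ e then
            let _grouped_start := ((PySem.List.pyGet? grp 0).getD (0, 0)).1
            let _grouped_end := ((PySem.List.pyGet? grp (-1)).getD (0, 0)).2
            (s.1 ++ List.replicate grp.length s.2.2, [], s.2.2 + 1)
          else
            (s.1, grp, s.2.2))
        (acc, grp, gs)).1 = pvRunA rest grp gs acc := by
  intro rest
  induction rest with
  | nil => intro i acc grp gs _; simp [PySem.List.enumerate, pvRunA]
  | cons hd tl ih =>
    intro i acc grp gs hdrop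
    obtain ⟨s, e⟩ := hd
    have hlen : g.length = i + 1 + tl.length := by
      have := congrArg List.length hdrop
      simp at this
      omega
    have hget : PySem.List.pyGet? g ((i : Int) + 1) = tl[0]? := by
      have h1 : ((i : Int) + 1) = ((i + 1 : Nat) : Int) := by push_cast; ring
      rw [h1, PySem.List.pyGet?_natCast]
      have h2 : (g.drop i)[1]? = g[i + 1]? := by rw [List.getElem?_drop]
      rw [← h2, hdrop]
      simp
    have hcond : ((i : Int) = (g.length : Int) - 1 ∨
        ((PySem.List.pyGet? g ((i : Int) + 1)).getD (0, 0)).1 ≠ e) ↔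
        (tl = [] ∨ (tl.headD (0, 0)).1 ≠ e) := by
      cases tl with
      | nil =>
        have hil : (i : Int) = (g.length : Int) - 1 := by
          simp only [List.length_nil] at hlen; rw [hlen]; push_cast; ring
        simp [hil]
      | cons h2 t2 =>
        have hil : ¬ ((i : Int) = (g.length : Int) - 1) := by
          simp only [List.length_cons] at hlen; rw [hlen]; push_cast; omega
        simp [hget, hil]
    have hdrop' : g.drop (i + 1) = tl := by
      have h3 : g.drop (i + 1) = (g.drop i).drop 1 := by rw [List.drop_drop]
      rw [h3, hdrop]; rfl
    have hcast : ((i : Int) + 1) = ((i + 1 : Nat) : Int) := by push_cast; ring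
    rw [PySem.List.enumerate_cons, List.foldl_cons, pvRunA]
    by_cases hc : tl = [] ∨ (tl.headD (0, 0)).1 ≠ e
    · have hc' := hcond.mpr hc
      rw [if_pos hc]
      simp only [hc', if_pos]
      rw [hcast, ih (i + 1) (acc ++ List.replicate (grp ++ [(s, e)]).length gs) [] (gs + 1) hdrop']
    · have hc' : ¬ ((i : Int) = (g.length : Int) - 1 ∨
          ((PySem.List.pyGet? g ((i : Int) + 1)).getD (0, 0)).1 ≠ e) := fun h => hc (hcond.mp h)
      rw [if_neg hc]
      simp only [hc', ite_false]
      rw [hcast, ih (i + 1) acc (grp ++ [(s, e)]) gs hdrop']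

theorem pvGameA_eq_runA (g : List (Int × Int)) : pvGameA g = pvRunA g [] 0 [] := by
  unfold pvGameA
  exact pvFoldA_eq g g 0 [] [] 0 (by simp)

-- pvRunA agrees with B's fold under the state invariant
theorem pvRunA_eq_foldB :
    ∀ (rest : List (Int × Int)) (accA : List Int) (grp : List (Int × Int)) (gs : Int)
      (accB : List Int) (idx : Int) (prevEnd : Option Int),
      accB = accA ++ List.replicate grp.length gs →
      idx = (if grp = [] then gs - 1 else gs) →
      (rest = [] → grp = []) →
      (∀ s e tl', rest = (s, e) :: tl' → (grp = [] ↔ (prevEnd = none ∨ prevEnd ≠ some s))) →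
      pvRunA rest grp gs accA =
        (rest.foldl
          (fun (st : List Int × Int × Option Int) se =>
            let idx := if st.2.2 = none ∨ st.2.2 ≠ some se.1 then st.2.1 + 1 else st.2.1
            (st.1 ++ [idx], idx, some se.2))
          (accB, idx, prevEnd)).1 := by
  intro rest
  induction rest with
  | nil =>
    intro accA grp gs accB idx prevEnd hB _ hnil _
    simp [pvRunA, hB, hnil rfl]
  | cons hd tl ih =>
    intro accA grp gs accB idx prevEnd hB hidx _hnil hinv
    obtain ⟨s, e⟩ := hd
    have hiff := hinv s e tl rfl
    have hstep : (if prevEnd = none ∨ prevEnd ≠ some s then idx + 1 else idx) = gs := by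
      by_cases hg : grp = []
      · rw [if_pos (hiff.mp hg), hidx, if_pos hg]; ring
      · rw [if_neg (fun h => hg (hiff.mpr h)), hidx, if_neg hg]
    rw [List.foldl_cons, pvRunA]
    simp only [hstep]
    by_cases hc : tl = [] ∨ (tl.headD (0, 0)).1 ≠ e
    · rw [if_pos hc]
      refine ih (accA ++ List.replicate (grp ++ [(s, e)]).length gs) [] (gs + 1)
        (accB ++ [gs]) gs (some e) ?_ ?_ (fun _ => rfl) ?_
      · rw [hB]
        simp [List.replicate_succ']
      · simp
      · intro s2 e2 tl2 htl
        have hne : s2 ≠ e := by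
          rcases hc with h | h
          · rw [htl] at h; simp at h
          · rw [htl] at h; simpa using h
        simp only [true_iff]
        right
        intro hcontra
        exact hne (by injection hcontra with h; exact h.symm)
    · rw [if_neg hc]
      rw [not_or, not_not] at hc
      refine ih accA (grp ++ [(s, e)]) gs (accB ++ [gs]) gs (some e) ?_ ?_ ?_ ?_
      · rw [hB]
        simp [List.replicate_succ']
      · rw [if_neg (by simp)]
      · intro h; exact absurd h hc.1
      · intro s2 e2 tl2 htl
        have hse : s2 = e := by
          have := hc.2
          rw [htl] at this
          simpa using this
        constructor
        · intro h; simp at h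
        · rintro (h | h)
          · exact absurd h (by simp)
          · exact (h (by rw [hse])).elim

theorem pvGameA_eq_pvGameB (g : List (Int × Int)) : pvGameA g = pvGameB g := by
  rw [pvGameA_eq_runA]
  unfold pvGameB
  exact pvRunA_eq_foldB g [] [] 0 [] (-1) none (by simp) (by simp) (fun _ => rfl)
    (fun s e tl h => by simp)

theorem pvFoldl_append_eq_map (l : List (List (Int × Int))) :
    ∀ acc : List (List Int),
      l.foldl (fun acc g => acc ++ [pvGameA g]) acc = acc ++ l.map pvGameB := by
  induction l with
  | nil => intro acc; simp
  | cons hd tl ih =>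
    intro acc
    rw [List.foldl_cons, ih (acc ++ [pvGameA hd]), pvGameA_eq_pvGameB]
    simp

-- ===== VERDICT (by name: the statement is the Claim_ definition above) =====
theorem batch_offset_mapping_to_move_index_spec : Claim_equal_batch_offset_mapping_to_move_index := by
  intro bom _
  unfold Spec_batch_offset_mapping_to_move_index
  unfold batch_offset_mapping_to_move_index batch_offset_mapping_to_move_index_alt
  rw [pvFoldl_append_eq_map bom []]
  simp
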